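-- pv_equiv track=rewrite | github.com/ShashankSinha98/Competitive-Programming | 6. Maths-III Solving Linear Recurrences/Recursive_Sequence.py | transformation_matrix
-- ===== SOURCE A (Python) =====
-- def transformation_matrix(c):
--     k = len(c)
--     T = [[0]*(k+1) for i in range(k+1)]
--     T[0][0] = 1
--
--     for i in range(k+1):
--         for j in range(1,k+1):
--
--             if i==0:
--                 T[i][j] = c[k-j]
--             elif i<k:
--                 if j == i+1:
--                     T[i][j] = 1
--             else:
--                 T[i][j] = c[k-j]
--     return T
-- ===== SOURCE B (Python) =====
-- def transformation_matrix(c):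
--     # Build the matrix column-by-column (each column is easy to describe),
--     # then transpose with zip to get the row-major result.
--     k = len(c)
--     cols = [[1] + [0] * k]
--     for j in range(1, k + 1):
--         col = [c[k - j]] + [0] * (k - 1) + [c[k - j]]
--         if j >= 2:
--             col[j - 1] = 1
--         cols.append(col)
--     return [list(row) for row in zip(*cols)]
-- ===== Notes on version B (the rewrite author's own statement) =====
-- stated objective: alternative
-- what changed: B constructs the matrix column-by-column (each column of the companion matrix is described directly) and then transposes with zip(*cols), instead of A's cell-by-cell fill of a zero matrix driven by a doubly nested loop with position tests.
import Mathlib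
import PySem

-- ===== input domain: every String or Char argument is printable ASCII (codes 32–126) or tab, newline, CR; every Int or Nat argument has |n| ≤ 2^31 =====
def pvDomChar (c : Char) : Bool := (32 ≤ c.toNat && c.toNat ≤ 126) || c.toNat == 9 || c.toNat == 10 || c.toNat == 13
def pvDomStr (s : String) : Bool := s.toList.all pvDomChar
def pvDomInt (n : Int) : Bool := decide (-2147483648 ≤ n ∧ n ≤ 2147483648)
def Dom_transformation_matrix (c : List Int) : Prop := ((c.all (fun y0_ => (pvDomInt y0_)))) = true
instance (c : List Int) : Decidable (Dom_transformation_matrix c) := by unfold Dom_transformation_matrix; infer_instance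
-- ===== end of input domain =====

-- B builds the matrix column-by-column and transposes with zip, instead of A's
-- nested-loop cell-by-cell fill of a zero matrix; objective: alternative algorithmic decomposition.

-- ===== PORT A =====
-- literal transliteration of A: zero matrix, T[0][0]=1, nested loops over i,j mutating T
def transformation_matrix (c : List Int) : List (List Int) :=
  let k := c.length
  let T0 : List (List Int) := (List.range (k+1)).map (fun _ => List.replicate (k+1) (0:Int))
  let T1 := T0.set 0 ((T0.getD 0 []).set 0 1)
  (List.range (k+1)).foldl (fun T i =>
    (List.range' 1 k).foldl (fun T j =>
      if i = 0 then T.set i ((T.getD i []).set j (c.getD (k-j) 0))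
      else if i < k then (if j = i+1 then T.set i ((T.getD i []).set j 1) else T)
      else T.set i ((T.getD i []).set j (c.getD (k-j) 0))) T) T1

-- ===== PORT B =====
-- the loop body of B: the j-th column ([c[k-j]] + [0]*(k-1) + [c[k-j]], with a 1 at row j-1 when j>=2)
def colFunB (c : List Int) (j : Nat) : List Int :=
  let k := c.length
  let col := c.getD (k-j) 0 :: (List.replicate (k-1) (0:Int) ++ [c.getD (k-j) 0])
  if 2 ≤ j then col.set (j-1) 1 else col

-- zip(*L) for equal-length integer rows (Python zip truncates to the shortest row)
def pyZipStar (L : List (List Int)) : List (List Int) :=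
  let n := match L with
    | [] => 0
    | r :: rs => rs.foldl (fun m s => min m s.length) r.length
  (List.range n).map (fun i => L.map (fun r => r.getD i 0))

-- literal transliteration of B: columns accumulated in a loop, then transposed
def transformation_matrix_alt (c : List Int) : List (List Int) :=
  let k := c.length
  let cols := (List.range' 1 k).foldl (fun cols j => cols ++ [colFunB c j])
                [(1:Int) :: List.replicate k 0]
  pyZipStar cols

-- ===== PRECONDITION & SPEC =====
def Spec_transformation_matrix (c : List Int) (out : List (List Int)) : Prop := out = transformation_matrix_alt c
instance (c : List Int) (out : List (List Int)) : Decidable (Spec_transformation_matrix c out) := by unfold Spec_transformation_matrix; infer_instance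

-- ===== CLAIM (what is proved, stated in full; the proofs are below) =====
def Claim_equal_transformation_matrix : Prop := ∀ (c : List Int), Dom_transformation_matrix c → Spec_transformation_matrix c (transformation_matrix c)

-- ===== LEMMAS AND PROOFS =====

-- the row-level step of A's inner loop, for row i
def rowStepA (c : List Int) (i : Nat) (r : List Int) (j : Nat) : List Int :=
  if i = 0 then r.set j (c.getD (c.length - j) 0)
  else if i < c.length then (if j = i+1 then r.set j 1 else r)
  else r.set j (c.getD (c.length - j) 0)

-- A's inner fold over the whole matrix only touches row i
lemma inner_lift (c : List Int) (i : Nat) (js : List Nat) :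
    ∀ (T : List (List Int)), i < T.length →
    js.foldl (fun T j =>
      if i = 0 then T.set i ((T.getD i []).set j (c.getD (c.length-j) 0))
      else if i < c.length then (if j = i+1 then T.set i ((T.getD i []).set j 1) else T)
      else T.set i ((T.getD i []).set j (c.getD (c.length-j) 0))) T
    = T.set i (js.foldl (rowStepA c i) (T.getD i [])) := by
  induction js with
  | nil =>
      intro T hT
      simp only [List.foldl_nil, List.getD, List.getElem?_eq_getElem hT, Option.getD_some]
      exact (List.set_getElem_self hT).symm
  | cons j js ih =>
      intro T hT
      simp only [List.foldl_cons]
      by_cases h0 : i = 0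
      · simp only [rowStepA, if_pos h0] at ih ⊢
        rw [ih _ (by simpa using hT)]
        simp [List.getD, hT, List.set_set]
      · by_cases hk : i < c.length
        · simp only [rowStepA, if_neg h0, if_pos hk] at ih ⊢
          by_cases hj : j = i + 1
          · simp only [if_pos hj]
            rw [ih _ (by simpa using hT)]
            simp [List.getD, hT, List.set_set]
          · simp only [if_neg hj]
            exact ih T hT
        · simp only [rowStepA, if_neg h0, if_neg hk] at ih ⊢
          rw [ih _ (by simpa using hT)]
          simp [List.getD, hT, List.set_set]

-- filling consecutive positions of a row by set
lemma foldl_set_fill (f : Nat → Int) :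
    ∀ (n a : Nat) (r : List Int), a + n ≤ r.length →
    (List.range' a n).foldl (fun r j => r.set j (f j)) r
    = r.take a ++ (List.range' a n).map f ++ r.drop (a+n) := by
  intro n
  induction n with
  | zero => intro a r h; simp
  | succ n ih =>
      intro a r h
      rw [List.range'_succ, List.foldl_cons, ih (a+1) _ (by simpa [Nat.add_comm, Nat.add_left_comm] using h)]
      have ha : a < r.length := by omega
      rw [List.set_eq_take_append_cons_drop, if_pos ha]
      have htl : (r.take a).length = a := by simp; omega
      rw [List.take_append, List.drop_append, htl]
      have e1 : (r.take a).take (a+1) = r.take a := by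
        rw [List.take_take]; congr 1; omega
      have e2 : a + 1 - a = 1 := by omega
      have e3 : a + 1 + n - a = n + 1 := by omega
      have e4 : (r.take a).drop (a+1+n) = [] := by
        apply List.drop_eq_nil_of_le; omega
      rw [e1, e2, e3, e4]
      simp only [List.map_cons, List.take_succ_cons, List.take_zero,
        List.drop_succ_cons, List.nil_append, List.drop_drop]
      simp [List.append_assoc]
      omega

-- the filled row values are reversed c
lemma map_rev (c : List Int) :
    (List.range' 1 c.length).map (fun j => c.getD (c.length - j) 0) = c.reverse := by
  apply List.ext_getElem
  · simp
  · intro m h1 h2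
    simp only [List.getElem_map, List.getElem_range', List.getElem_reverse]
    have hm : m < c.length := by simpa using h2
    rw [List.getD_eq_getElem _ _ (by omega)]
    congr 1
    omega

-- a conditional-set fold is the identity when the target index never occurs
lemma foldl_unit_id (t : Nat) (v : Int) :
    ∀ (js : List Nat) (r : List Int), (∀ j ∈ js, j ≠ t) →
    js.foldl (fun r j => if j = t then r.set j v else r) r = r := by
  intro js
  induction js with
  | nil => intro r _; simp
  | cons j js ih =>
      intro r h
      simp only [List.foldl_cons]
      rw [if_neg (h j (by simp))]
      exact ih r (fun x hx => h x (by simp [hx]))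

-- interior rows: the inner loop is a single set at i+1
lemma foldl_unit (k i : Nat) (_hi : 1 ≤ i) (hik : i < k) (r : List Int) :
    (List.range' 1 k).foldl (fun r j => if j = i+1 then r.set j 1 else r) r = r.set (i+1) 1 := by
  have hsplit : List.range' 1 k = List.range' 1 i ++ (i+1) :: List.range' (i+2) (k-i-1) := by
    have h1 : List.range' 1 i ++ List.range' (1+i) (k-i) = List.range' 1 k := by
      rw [List.range'_append_1]; congr 1; omega
    have h2 : List.range' (1+i) (k-i) = (i+1) :: List.range' (i+2) (k-i-1) := by
      generalize hm : k - i - 1 = m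
      have e0 : k - i = m + 1 := by omega
      rw [e0, List.range'_succ]
      have e1 : (1:Nat)+i = i+1 := by omega
      have e2 : i+1+1 = i+2 := by omega
      rw [e1, e2]
    rw [← h1, h2]
  rw [hsplit, List.foldl_append, foldl_unit_id (i+1) 1 _ r
        (by intro j hj; rw [List.mem_range'] at hj; obtain ⟨q,hq,rfl⟩ := hj; omega)]
  simp only [List.foldl_cons]
  rw [if_pos trivial]
  exact foldl_unit_id (i+1) 1 _ _ (by intro j hj; rw [List.mem_range'] at hj; obtain ⟨q,hq,rfl⟩ := hj; omega)

-- setting one cell of a zero row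
lemma set_replicate : ∀ (m n : Nat), m < n →
    (List.replicate n (0:Int)).set m 1 = List.replicate m (0:Int) ++ (1:Int) :: List.replicate (n-m-1) (0:Int) := by
  intro m
  induction m with
  | zero =>
      intro n h
      cases n with
      | zero => omega
      | succ n => simp [List.replicate_succ]
  | succ m ih =>
      intro n h
      cases n with
      | zero => omega
      | succ n =>
          simp only [List.replicate_succ, List.set_cons_succ, List.cons_append]
          rw [ih n (by omega)]
          have : n + 1 - (m+1) - 1 = n - m - 1 := by omega
          rw [this]

-- the outer fold, peeled from the right: sets rows a..a+n-1 from the original rows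
lemma outer_fold (g : Nat → List Int → List Int) :
    ∀ (n a : Nat) (T : List (List Int)), a + n ≤ T.length →
    (List.range' a n).foldl (fun T i => T.set i (g i (T.getD i []))) T
    = T.take a ++ (List.range' a n).map (fun i => g i (T.getD i [])) ++ T.drop (a+n) := by
  intro n
  induction n with
  | zero => intro a T h; simp
  | succ n ih =>
      intro a T h
      have hrr : List.range' a (n+1) = List.range' a n ++ [a+n] := List.range'_1_concat ..
      rw [hrr, List.foldl_append, ih a T (by omega), List.foldl_cons, List.foldl_nil,
          List.map_append]
      set X := T.take a ++ (List.range' a n).map (fun i => g i (T.getD i [])) with hX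
      have hXlen : X.length = a + n := by
        simp [hX]; omega
      have han : a + n < T.length := by omega
      have hdrop : T.drop (a+n) = T[a+n] :: T.drop (a+n+1) := by
        rw [List.drop_eq_getElem_cons han]
      have hlen2 : (X ++ T.drop (a+n)).length = T.length := by
        simp [hXlen]; omega
      have hget : (X ++ T.drop (a+n)).getD (a+n) [] = T.getD (a+n) [] := by
        rw [List.getD_eq_getElem _ _ (by rw [hlen2]; omega),
            List.getElem_append_right (by omega), List.getD_eq_getElem _ _ han]
        have h0 : a + n - X.length = 0 := by omega
        simp only [h0, hdrop, List.getElem_cons_zero]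
      rw [hget, List.set_append_right _ _ (by omega), hXlen, Nat.sub_self, hdrop,
          List.set_cons_zero]
      have hnn : a + (n+1) = a + n + 1 := by omega
      rw [hnn]
      simp [hX, List.append_assoc]

-- a fold that appends one element per index is a map
lemma foldl_append_map (f : Nat → List Int) :
    ∀ (js : List Nat) (rows : List (List Int)),
    js.foldl (fun rows i => rows ++ [f i]) rows = rows ++ js.map f := by
  intro js
  induction js with
  | nil => intro rows; simp
  | cons j js ih => intro rows; simp [ih]

-- A's outer loop, rewritten row-locally via inner_lift (length is preserved by set)
lemma outer_congr (c : List Int) : ∀ (is : List Nat) (T : List (List Int)), (∀ i ∈ is, i < T.length) →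
    is.foldl (fun T i => (List.range' 1 c.length).foldl (fun T j =>
      if i = 0 then T.set i ((T.getD i []).set j (c.getD (c.length-j) 0))
      else if i < c.length then (if j = i+1 then T.set i ((T.getD i []).set j 1) else T)
      else T.set i ((T.getD i []).set j (c.getD (c.length-j) 0))) T) T
    = is.foldl (fun T i => T.set i ((List.range' 1 c.length).foldl (rowStepA c i) (T.getD i []))) T := by
  intro is
  induction is with
  | nil => intro T h; rfl
  | cons i is ih =>
      intro T h
      simp only [List.foldl_cons]
      rw [inner_lift c i _ T (h i (by simp))]
      exact ih _ (by intro x hx; simpa using h x (List.mem_cons_of_mem _ hx))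

-- evaluation of A on nonempty input
lemma A_eval (c : List Int) (hk : 1 ≤ c.length) :
    transformation_matrix c
    = ((1:Int) :: c.reverse) :: ((List.range' 1 (c.length-1)).map
        (fun i => List.replicate (i+1) (0:Int) ++ (1:Int) :: List.replicate (c.length-i-1) (0:Int))
      ++ [(0:Int) :: c.reverse]) := by
  simp only [transformation_matrix]
  have hT0 : (List.range (c.length+1)).map (fun _ => List.replicate (c.length+1) (0:Int))
      = List.replicate (c.length+1) (List.replicate (c.length+1) (0:Int)) := by
    simp [List.map_const']
  rw [hT0]
  have hT1 : (List.replicate (c.length+1) (List.replicate (c.length+1) (0:Int))).set 0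
        (((List.replicate (c.length+1) (List.replicate (c.length+1) (0:Int))).getD 0 []).set 0 1)
      = ((1:Int) :: List.replicate c.length (0:Int))
        :: List.replicate c.length (List.replicate (c.length+1) (0:Int)) := by
    simp [List.replicate_succ]
  rw [hT1]
  set T1 := ((1:Int) :: List.replicate c.length (0:Int))
      :: List.replicate c.length (List.replicate (c.length+1) (0:Int)) with hT1def
  have hT1len : T1.length = c.length + 1 := by simp [hT1def]
  rw [List.range_eq_range', outer_congr c _ _ (by
    intro i hi
    rw [List.mem_range'_1] at hi
    omega)]
  have houter := outer_fold (fun i r => (List.range' 1 c.length).foldl (rowStepA c i) r)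
      (c.length+1) 0 T1 (by omega)
  simp only [Nat.zero_add, List.take_zero, List.nil_append] at houter
  rw [houter, List.drop_eq_nil_of_le (by omega), List.append_nil]
  -- row 0
  have hg0 : T1.getD 0 [] = (1:Int) :: List.replicate c.length (0:Int) := by simp [hT1def]
  have hstep0 : rowStepA c 0 = fun r j => r.set j (c.getD (c.length - j) 0) := by
    funext r j; simp [rowStepA]
  have hrow0 : (List.range' 1 c.length).foldl (rowStepA c 0) (T1.getD 0 []) = (1:Int) :: c.reverse := by
    rw [hg0, hstep0, foldl_set_fill _ c.length 1 _ (by simp; omega), map_rev]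
    simp
  -- interior rows
  have hgi : ∀ i, 1 ≤ i → i ≤ c.length → T1.getD i [] = List.replicate (c.length+1) (0:Int) := by
    intro i h1 h2
    obtain ⟨m, rfl⟩ : ∃ m, i = m + 1 := ⟨i - 1, by omega⟩
    simp only [hT1def, List.getD_cons_succ]
    rw [List.getD_eq_getElem _ _ (by simp; omega), List.getElem_replicate]
  have hrowi : ∀ i, 1 ≤ i → i < c.length →
      (List.range' 1 c.length).foldl (rowStepA c i) (T1.getD i [])
      = List.replicate (i+1) (0:Int) ++ (1:Int) :: List.replicate (c.length-i-1) (0:Int) := by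
    intro i h1 h2
    have hstep : rowStepA c i = fun r j => if j = i+1 then r.set j 1 else r := by
      funext r j
      have hne : i ≠ 0 := by omega
      simp [rowStepA, hne, h2]
    rw [hgi i h1 (le_of_lt h2), hstep, foldl_unit c.length i h1 h2,
        set_replicate (i+1) (c.length+1) (by omega)]
    have e : c.length + 1 - (i+1) - 1 = c.length - i - 1 := by omega
    rw [e]
  -- last row
  have hrowk : (List.range' 1 c.length).foldl (rowStepA c c.length) (T1.getD c.length [])
      = (0:Int) :: c.reverse := by
    have hstep : rowStepA c c.length = fun r j => r.set j (c.getD (c.length - j) 0) := by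
      funext r j; simp [rowStepA]
    rw [hgi c.length hk le_rfl, hstep, foldl_set_fill _ c.length 1 _ (by simp; omega), map_rev]
    have e1 : (List.replicate (c.length+1) (0:Int)).take 1 = [(0:Int)] := by
      rw [List.take_replicate]
      have : min 1 (c.length+1) = 1 := by omega
      rw [this]
      rfl
    have e2 : (List.replicate (c.length+1) (0:Int)).drop (1+c.length) = [] := by
      apply List.drop_eq_nil_of_le; simp
    rw [e1, e2]
    simp
  -- closed form for every row
  have hrows : ∀ i ∈ List.range' 0 (c.length+1),
      (List.range' 1 c.length).foldl (rowStepA c i) (T1.getD i [])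
      = (if i = 0 then (1:Int) :: c.reverse
         else if i < c.length then
           List.replicate (i+1) (0:Int) ++ (1:Int) :: List.replicate (c.length-i-1) (0:Int)
         else (0:Int) :: c.reverse) := by
    intro i hi
    rw [List.mem_range'_1] at hi
    by_cases h0 : i = 0
    · subst h0; rw [hrow0]; simp
    · by_cases hlt : i < c.length
      · rw [hrowi i (by omega) hlt, if_neg h0, if_pos hlt]
      · have he : i = c.length := by omega
        subst he
        rw [hrowk, if_neg h0, if_neg hlt]
  rw [List.map_congr_left hrows]
  -- split the index range: 0, interior, last
  have hsplit0 : List.range' 0 (c.length+1) = 0 :: List.range' 1 c.length := by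
    rw [List.range'_succ]
  have hsplitk : List.range' 1 c.length = List.range' 1 (c.length-1) ++ [c.length] := by
    obtain ⟨m, hm⟩ : ∃ m, c.length = m + 1 := ⟨c.length - 1, by omega⟩
    rw [hm, List.range'_1_concat]
    have e2 : 1 + m = m + 1 := by omega
    have e3 : m + 1 - 1 = m := by omega
    rw [e2, e3]
  rw [hsplit0, List.map_cons, if_pos rfl, hsplitk, List.map_append]
  congr 2
  · apply List.map_congr_left
    intro i hi
    rw [List.mem_range'_1] at hi
    rw [if_neg (by omega), if_pos (by omega)]
  · simp only [List.map_cons, List.map_nil]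
    rw [if_neg (by omega), if_neg (by omega)]

-- pyZipStar on a nonempty list, unfolded
lemma pyZipStar_cons (r : List Int) (rs : List (List Int)) :
    pyZipStar (r :: rs) = (List.range (rs.foldl (fun m s => min m s.length) r.length)).map
      (fun i => (r :: rs).map (fun t => t.getD i 0)) := rfl

-- minimum row length of a constant-length family
lemma foldl_min_const (n : Nat) : ∀ (rs : List (List Int)), (∀ r ∈ rs, r.length = n) →
    rs.foldl (fun m s => min m s.length) n = n := by
  intro rs
  induction rs with
  | nil => intro _; rfl
  | cons r rs ih =>
      intro h
      simp only [List.foldl_cons, h r (by simp), Nat.min_self]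
      exact ih (fun x hx => h x (by simp [hx]))

-- getD of the j-th column of B, all cases
lemma colFunB_getD (c : List Int) (j i : Nat) (hk : 1 ≤ c.length)
    (_hj1 : 1 ≤ j) (hjk : j ≤ c.length) (hik : i ≤ c.length) :
    (colFunB c j).getD i 0
    = if i = 0 ∨ i = c.length then c.getD (c.length - j) 0
      else if i = j - 1 ∧ 2 ≤ j then 1 else 0 := by
  have hbase : ∀ m, m ≤ c.length →
      ((c.getD (c.length - j) 0) :: (List.replicate (c.length - 1) (0:Int) ++ [c.getD (c.length - j) 0])).getD m 0
      = if m = 0 ∨ m = c.length then c.getD (c.length - j) 0 else 0 := by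
    intro m hm
    rcases Nat.eq_zero_or_pos m with h0 | hpos
    · subst h0; simp
    · obtain ⟨s, rfl⟩ : ∃ s, m = s + 1 := ⟨m - 1, by omega⟩
      simp only [List.getD_cons_succ]
      by_cases hmk : s + 1 = c.length
      · rw [List.getD_eq_getElem _ _ (by simp; omega),
            List.getElem_append_right (by simp; omega)]
        simp only [List.length_replicate]
        rw [if_pos (Or.inr hmk)]
        have h0' : s - (c.length - 1) = 0 := by omega
        simp [h0']
      · rw [List.getD_eq_getElem _ _ (by simp; omega),
            List.getElem_append_left (by simp; omega), List.getElem_replicate]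
        rw [if_neg (by omega)]
  simp only [colFunB]
  by_cases h2 : 2 ≤ j
  · rw [if_pos h2]
    by_cases hij : i = j - 1
    · subst hij
      rw [List.getD_eq_getElem _ _ (by simp [List.length_set]; omega), List.getElem_set,
          if_pos rfl, if_neg (by omega), if_pos ⟨rfl, h2⟩]
    · rw [List.getD_eq_getElem _ _ (by simp [List.length_set]; omega), List.getElem_set,
          if_neg (by omega), ← List.getD_eq_getElem _ 0 (by simp; omega), hbase i hik]
      by_cases hi0 : i = 0 ∨ i = c.length
      · rw [if_pos hi0, if_pos hi0]
      · rw [if_neg hi0, if_neg hi0, if_neg (fun h => hij h.1)]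
  · rw [if_neg h2, hbase i hik]
    by_cases hi0 : i = 0 ∨ i = c.length
    · rw [if_pos hi0, if_pos hi0]
    · rw [if_neg hi0, if_neg hi0, if_neg (by intro h; exact absurd h.2 h2)]

-- evaluation of B on nonempty input
lemma B_eval (c : List Int) (hk : 1 ≤ c.length) :
    transformation_matrix_alt c
    = ((1:Int) :: c.reverse) :: ((List.range' 1 (c.length-1)).map
        (fun i => List.replicate (i+1) (0:Int) ++ (1:Int) :: List.replicate (c.length-i-1) (0:Int))
      ++ [(0:Int) :: c.reverse]) := by
  simp only [transformation_matrix_alt]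
  rw [foldl_append_map, List.singleton_append, pyZipStar_cons]
  have hlens : ∀ r ∈ (List.range' 1 c.length).map (colFunB c), r.length = c.length + 1 := by
    intro r hr
    obtain ⟨j, hj, rfl⟩ := List.mem_map.mp hr
    simp only [colFunB]
    by_cases h2 : 2 ≤ j
    · rw [if_pos h2]; simp; omega
    · rw [if_neg h2]; simp; omega
  have hlen0 : ((1:Int) :: List.replicate c.length (0:Int)).length = c.length + 1 := by simp
  rw [hlen0, foldl_min_const (c.length+1) _ hlens]
  have hsplit : List.range (c.length+1) = 0 :: (List.range' 1 (c.length-1) ++ [c.length]) := by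
    rw [List.range_eq_range', List.range'_succ]
    congr 1
    obtain ⟨m, hm⟩ : ∃ m, c.length = m + 1 := ⟨c.length - 1, by omega⟩
    rw [hm, List.range'_1_concat]
    have e2 : 1 + m = m + 1 := by omega
    have e3 : m + 1 - 1 = m := by omega
    rw [e2, e3]
  rw [hsplit]
  have hf : ∀ i, ((((1:Int) :: List.replicate c.length 0) :: (List.range' 1 c.length).map (colFunB c)).map (fun t => t.getD i 0))
      = (((1:Int) :: List.replicate c.length 0).getD i 0) :: (List.range' 1 c.length).map (fun j => (colFunB c j).getD i 0) := by
    intro i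
    simp [List.map_map, Function.comp]
  have hhead0 : ∀ i, 1 ≤ i → i ≤ c.length → (((1:Int) :: List.replicate c.length 0).getD i 0) = 0 := by
    intro i h1 h2
    obtain ⟨s, rfl⟩ : ∃ s, i = s + 1 := ⟨i - 1, by omega⟩
    simp only [List.getD_cons_succ]
    rw [List.getD_eq_getElem _ _ (by simp; omega), List.getElem_replicate]
  have hrow0 : ((((1:Int) :: List.replicate c.length 0) :: (List.range' 1 c.length).map (colFunB c)).map (fun t => t.getD 0 0))
      = (1:Int) :: c.reverse := by
    rw [hf]
    have h1 : (((1:Int) :: List.replicate c.length 0).getD 0 0) = 1 := by simp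
    rw [h1]
    congr 1
    have h2 : ∀ j ∈ List.range' 1 c.length, (colFunB c j).getD 0 0 = c.getD (c.length - j) 0 := by
      intro j hj
      rw [List.mem_range'_1] at hj
      rw [colFunB_getD c j 0 hk (by omega) (by omega) (by omega), if_pos (Or.inl rfl)]
    rw [List.map_congr_left h2, map_rev c]
  have hrowk : ((((1:Int) :: List.replicate c.length 0) :: (List.range' 1 c.length).map (colFunB c)).map (fun t => t.getD c.length 0))
      = (0:Int) :: c.reverse := by
    rw [hf, hhead0 c.length hk le_rfl]
    congr 1
    have h2 : ∀ j ∈ List.range' 1 c.length, (colFunB c j).getD c.length 0 = c.getD (c.length - j) 0 := by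
      intro j hj
      rw [List.mem_range'_1] at hj
      rw [colFunB_getD c j c.length hk (by omega) (by omega) le_rfl, if_pos (Or.inr rfl)]
    rw [List.map_congr_left h2, map_rev c]
  have hrowi : ∀ i, 1 ≤ i → i < c.length →
      ((((1:Int) :: List.replicate c.length 0) :: (List.range' 1 c.length).map (colFunB c)).map (fun t => t.getD i 0))
      = List.replicate (i+1) (0:Int) ++ (1:Int) :: List.replicate (c.length-i-1) (0:Int) := by
    intro i h1 h2
    rw [hf, hhead0 i h1 (by omega)]
    have h2 : ∀ j ∈ List.range' 1 c.length, (colFunB c j).getD i 0 = if j = i + 1 then (1:Int) else 0 := by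
      intro j hj
      rw [List.mem_range'_1] at hj
      rw [colFunB_getD c j i hk (by omega) (by omega) (by omega), if_neg (by omega)]
      split_ifs with ha hb hb
      · rfl
      · omega
      · omega
      · rfl
    rw [List.map_congr_left h2]
    have e : c.length + 1 - (i+1) - 1 = c.length - i - 1 := by omega
    rw [← e, ← set_replicate (i+1) (c.length+1) (by omega)]
    apply List.ext_getElem
    · simp only [List.length_cons, List.length_map, List.length_range', List.length_set,
        List.length_replicate]
    · intro m hm1 hm2
      cases m with
      | zero =>
          simp only [List.getElem_cons_zero, List.getElem_set, List.getElem_replicate]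
          rw [if_neg (by omega)]
      | succ s =>
          simp only [List.getElem_cons_succ, List.getElem_map, List.getElem_range',
            List.getElem_set, List.getElem_replicate]
          have hs : s < c.length := by simpa using hm1
          split_ifs <;> omega
  have hrows : ∀ i ∈ (0 :: (List.range' 1 (c.length-1) ++ [c.length])),
      ((((1:Int) :: List.replicate c.length 0) :: (List.range' 1 c.length).map (colFunB c)).map (fun t => t.getD i 0))
      = (if i = 0 then (1:Int) :: c.reverse
         else if i < c.length then List.replicate (i+1) (0:Int) ++ (1:Int) :: List.replicate (c.length-i-1) (0:Int)
         else (0:Int) :: c.reverse) := by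
    intro i hi
    by_cases h0 : i = 0
    · subst h0; rw [hrow0]; simp
    · by_cases hlt : i < c.length
      · rw [hrowi i (by omega) hlt, if_neg h0, if_pos hlt]
      · have hib : i ≤ c.length := by
          rcases List.mem_cons.mp hi with h | h
          · omega
          · rcases List.mem_append.mp h with h | h
            · rw [List.mem_range'_1] at h; omega
            · simp at h; omega
        have hic : i = c.length := by omega
        subst hic; rw [hrowk, if_neg h0, if_neg hlt]
  rw [List.map_congr_left hrows, List.map_cons, if_pos rfl, List.map_append]
  congr 2
  · apply List.map_congr_left
    intro i hi
    rw [List.mem_range'_1] at hi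
    rw [if_neg (by omega), if_pos (by omega)]
  · simp only [List.map_cons, List.map_nil]
    rw [if_neg (by omega), if_neg (by omega)]

-- ===== VERDICT (by name: the statement is the Claim_ definition above) =====
theorem transformation_matrix_spec : Claim_equal_transformation_matrix := by
  intro c _
  unfold Spec_transformation_matrix
  by_cases hc : c = []
  · subst hc; decide
  · have hk : 1 ≤ c.length := by
      cases c with
      | nil => simp at hc
      | cons a l => simp
    rw [A_eval c hk, B_eval c hk]
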